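-- pv_equiv track=rewrite | github.com/terrastackai/geospatial-studio-core | gfmstudio/fine_tuning/core/mlflow_logs.py | get_overall_runs_status
-- ===== SOURCE A (Python) =====
-- def get_overall_runs_status(runs):
--     statuses = [run.get("status") for run in runs]
--
--     if "ERROR" in statuses:
--         return "ERROR"
--     elif "RUNNING" in statuses:
--         return "RUNNING"
--     elif "FINISHED" in statuses:
--         return "FINISHED"
--     else:
--         return "NOT_FOUND"
-- ===== SOURCE B (Python) =====
-- _PRIO = {"ERROR": 0, "RUNNING": 1, "FINISHED": 2}
-- _LEVELS = ["ERROR", "RUNNING", "FINISHED", "NOT_FOUND"]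
--
--
-- def get_overall_runs_status(runs):
--     best = 3
--     for run in runs:
--         p = _PRIO.get(run.get("status"), 3)
--         if p < best:
--             best = p
--     return _LEVELS[best]
-- ===== Notes on version B (the rewrite author's own statement) =====
-- stated objective: alternative
-- what changed: Replaces the build-a-status-list-then-three-membership-scans with a single reducing pass keeping the minimum severity priority (ERROR=0 < RUNNING=1 < FINISHED=2, default 3) and indexing the answer from that minimum.
import Mathlib
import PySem

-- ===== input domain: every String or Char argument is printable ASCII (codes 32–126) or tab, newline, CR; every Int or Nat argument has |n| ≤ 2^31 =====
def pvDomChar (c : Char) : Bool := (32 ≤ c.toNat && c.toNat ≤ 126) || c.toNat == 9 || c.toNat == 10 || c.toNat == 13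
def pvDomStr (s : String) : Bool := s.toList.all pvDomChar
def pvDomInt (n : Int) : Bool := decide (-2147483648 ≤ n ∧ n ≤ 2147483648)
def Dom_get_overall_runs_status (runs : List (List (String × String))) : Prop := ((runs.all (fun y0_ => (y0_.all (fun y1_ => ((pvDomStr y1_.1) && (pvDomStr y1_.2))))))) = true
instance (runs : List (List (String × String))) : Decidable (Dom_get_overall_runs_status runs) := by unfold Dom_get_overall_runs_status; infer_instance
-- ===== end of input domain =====

-- B replaces the status-list plus three membership scans by one reducing pass over a severity priority (alternative decomposition, same cost).

-- ===== PORT A =====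
def get_overall_runs_status (runs : List (List (String × String))) : String :=
  let statuses := runs.map (fun run => (PySem.Dict.mk run).get? "status")
  if statuses.contains (some "ERROR") then "ERROR"
  else if statuses.contains (some "RUNNING") then "RUNNING"
  else if statuses.contains (some "FINISHED") then "FINISHED"
  else "NOT_FOUND"

-- ===== PORT B =====
-- Source B's _PRIO.get(s, 3) on the 3-entry literal dict, ported as the same 3-way lookup
def pvPrio (s : Option String) : Nat :=
  if s = some "ERROR" then 0
  else if s = some "RUNNING" then 1
  else if s = some "FINISHED" then 2
  else 3

def pvLevels : List String := ["ERROR", "RUNNING", "FINISHED", "NOT_FOUND"]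

def get_overall_runs_status_alt (runs : List (List (String × String))) : String :=
  let best := runs.foldl (fun best run =>
    let p := pvPrio ((PySem.Dict.mk run).get? "status")
    if p < best then p else best) 3
  -- _LEVELS[best]: best ≤ 3 always (proved below), so getD never takes its default
  pvLevels.getD best ""

-- ===== PRECONDITION & SPEC =====
def Spec_get_overall_runs_status (runs : List (List (String × String))) (out : String) : Prop := out = get_overall_runs_status_alt runs
instance (runs : List (List (String × String))) (out : String) : Decidable (Spec_get_overall_runs_status runs out) := by unfold Spec_get_overall_runs_status; infer_instance

-- ===== CLAIM (what is proved, stated in full; the proofs are below) =====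
def Claim_equal_get_overall_runs_status : Prop := ∀ (runs : List (List (String × String))), Dom_get_overall_runs_status runs → Spec_get_overall_runs_status runs (get_overall_runs_status runs)

-- ===== LEMMAS AND PROOFS =====

-- the if-chain value A's membership tests select, expressed as a priority
def pvRhs (l : List (Option String)) : Nat :=
  if l.contains (some "ERROR") then 0
  else if l.contains (some "RUNNING") then 1
  else if l.contains (some "FINISHED") then 2
  else 3

lemma pvRhs_cons (s : Option String) (t : List (Option String)) :
    pvRhs (s :: t) = Nat.min (pvPrio s) (pvRhs t) := by
  simp only [pvRhs, pvPrio, List.contains_cons, Bool.or_eq_true, beq_iff_eq]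
  by_cases h0 : s = some "ERROR" <;> by_cases h1 : s = some "RUNNING" <;>
    by_cases h2 : s = some "FINISHED" <;>
    simp [h0, h1, h2, eq_comm, Nat.min_def] <;> split_ifs <;> omega

lemma pvFold_min (l : List (Option String)) (b : Nat) (hb : b ≤ 3) :
    l.foldl (fun best s => let p := pvPrio s; if p < best then p else best) b
      = Nat.min b (pvRhs l) := by
  induction l generalizing b with
  | nil => simp only [List.foldl_nil, pvRhs, List.contains_nil]; simp; omega
  | cons s t ih =>
      have hb' : (if pvPrio s < b then pvPrio s else b) ≤ 3 := by split_ifs <;> omega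
      simp only [List.foldl_cons, ih _ hb', pvRhs_cons]
      have : (if pvPrio s < b then pvPrio s else b) = Nat.min b (pvPrio s) := by
        simp [Nat.min_def]; split_ifs <;> omega
      rw [this]; exact Nat.min_assoc _ _ _

lemma pvRhs_le (l : List (Option String)) : pvRhs l ≤ 3 := by
  unfold pvRhs; split_ifs <;> omega

-- ===== VERDICT (by name: the statement is the Claim_ definition above) =====
theorem get_overall_runs_status_spec : Claim_equal_get_overall_runs_status := by
  intro runs _
  show get_overall_runs_status runs = get_overall_runs_status_alt runs
  have hfold := pvFold_min (runs.map (fun run => (PySem.Dict.mk run).get? "status")) 3 (by omega)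
  have hle := pvRhs_le (runs.map (fun run => (PySem.Dict.mk run).get? "status"))
  simp only [List.foldl_map] at hfold
  simp only [get_overall_runs_status, get_overall_runs_status_alt, hfold]
  have h3 : Nat.min 3 (pvRhs (runs.map (fun run => (PySem.Dict.mk run).get? "status")))
      = pvRhs (runs.map (fun run => (PySem.Dict.mk run).get? "status")) := Nat.min_eq_right hle
  rw [h3]
  unfold pvRhs
  split_ifs <;> rfl
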